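-- pv_equiv track=rewrite | github.com/kelvinhuang0327/number-pattern-research | tools/biglotto_diversified_ensemble.py | _pick_zonal_balanced
-- ===== SOURCE A (Python) =====
-- def _pick_zonal_balanced(score_dict, exposure, pruned_numbers):
--     # Pick top 2 from each zone: 1-16, 17-32, 33-49
--     z1 = [n for n in range(1, 17) if n not in pruned_numbers]
--     z2 = [n for n in range(17, 33) if n not in pruned_numbers]
--     z3 = [n for n in range(33, 50) if n not in pruned_numbers]
--
--     result = []
--     for zone in [z1, z2, z3]:
--         # Sort zone by score
--         sorted_zone = sorted(zone, key=lambda n: score_dict.get(n, 0), reverse=True)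
--         result.extend(sorted_zone[:2])
--     return result
-- ===== SOURCE B (Python) =====
-- def _pick_zonal_balanced(score_dict, exposure, pruned_numbers):
--     # One global stable descending sort of all eligible numbers, then a single
--     # pass routing each number to its zone list, capped at 2 per zone.
--     eligible = [n for n in range(1, 50) if n not in pruned_numbers]
--     ranked = sorted(eligible, key=lambda n: score_dict.get(n, 0), reverse=True)
--     z1, z2, z3 = [], [], []
--     for n in ranked:
--         zone = z1 if n <= 16 else z2 if n <= 32 else z3
--         if len(zone) < 2:
--             zone.append(n)
--     return z1 + z2 + z3
-- ===== Notes on version B (the rewrite author's own statement) =====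
-- stated objective: alternative
-- what changed: Replaces three per-zone sorts with one global stable descending sort of all eligible numbers followed by a single pass that routes each number to its zone list, capped at 2 per zone.
import Mathlib
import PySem

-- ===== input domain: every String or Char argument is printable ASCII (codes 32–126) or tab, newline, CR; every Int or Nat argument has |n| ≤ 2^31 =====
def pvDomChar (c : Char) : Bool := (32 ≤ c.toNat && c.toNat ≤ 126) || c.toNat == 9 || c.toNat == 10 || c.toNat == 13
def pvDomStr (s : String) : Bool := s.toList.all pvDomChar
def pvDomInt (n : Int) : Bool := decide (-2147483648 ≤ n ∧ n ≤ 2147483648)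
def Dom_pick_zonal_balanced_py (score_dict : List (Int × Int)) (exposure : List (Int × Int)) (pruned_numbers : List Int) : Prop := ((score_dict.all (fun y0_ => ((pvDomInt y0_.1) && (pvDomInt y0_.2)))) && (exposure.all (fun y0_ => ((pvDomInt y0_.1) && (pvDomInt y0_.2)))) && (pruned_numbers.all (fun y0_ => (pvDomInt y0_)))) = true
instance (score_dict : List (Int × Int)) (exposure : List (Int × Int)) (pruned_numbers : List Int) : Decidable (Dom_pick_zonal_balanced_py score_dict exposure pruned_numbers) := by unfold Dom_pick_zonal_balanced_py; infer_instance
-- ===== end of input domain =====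

-- B replaces A's three per-zone sorts by ONE stable descending sort of all eligible
-- numbers plus a single routing pass (cap 2 per zone); same cost class, different structure.

-- ===== PORT A =====
def pick_zonal_balanced_py (score_dict : List (Int × Int)) (exposure : List (Int × Int)) (pruned_numbers : List Int) : List Int :=
  let _ := exposure
  let z1 := (PySem.List.pyRange 1 17 1).filter (fun n => !pruned_numbers.contains n)
  let z2 := (PySem.List.pyRange 17 33 1).filter (fun n => !pruned_numbers.contains n)
  let z3 := (PySem.List.pyRange 33 50 1).filter (fun n => !pruned_numbers.contains n)
  [z1, z2, z3].foldl (fun result zone =>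
    result ++ PySem.List.slice
      (PySem.List.sorted zone (fun n => PySem.Dict.getD (PySem.Dict.mk score_dict) n (0:Int)) true) none (some 2)) []

-- ===== PORT B =====
-- loop body of B's routing pass ('zone = z1 if … ; if len(zone) < 2: zone.append(n)')
def pvRouteStep (s : List Int × List Int × List Int) (n : Int) : List Int × List Int × List Int :=
  if n ≤ 16 then (if s.1.length < 2 then (s.1 ++ [n], s.2.1, s.2.2) else s)
  else if n ≤ 32 then (if s.2.1.length < 2 then (s.1, s.2.1 ++ [n], s.2.2) else s)
  else (if s.2.2.length < 2 then (s.1, s.2.1, s.2.2 ++ [n]) else s)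

def pick_zonal_balanced_py_alt (score_dict : List (Int × Int)) (exposure : List (Int × Int)) (pruned_numbers : List Int) : List Int :=
  let _ := exposure
  let eligible := (PySem.List.pyRange 1 50 1).filter (fun n => !pruned_numbers.contains n)
  let ranked := PySem.List.sorted eligible (fun n => PySem.Dict.getD (PySem.Dict.mk score_dict) n (0:Int)) true
  let zs := ranked.foldl pvRouteStep ([], [], [])
  zs.1 ++ zs.2.1 ++ zs.2.2

-- ===== PRECONDITION & SPEC =====
def Spec_pick_zonal_balanced_py (score_dict : List (Int × Int)) (exposure : List (Int × Int)) (pruned_numbers : List Int) (out : List Int) : Prop := out = pick_zonal_balanced_py_alt score_dict exposure pruned_numbers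
instance (score_dict : List (Int × Int)) (exposure : List (Int × Int)) (pruned_numbers : List Int) (out : List Int) : Decidable (Spec_pick_zonal_balanced_py score_dict exposure pruned_numbers out) := by unfold Spec_pick_zonal_balanced_py; infer_instance

-- ===== CLAIM (what is proved, stated in full; the proofs are below) =====
def Claim_equal_pick_zonal_balanced_py : Prop := ∀ (score_dict : List (Int × Int)) (exposure : List (Int × Int)) (pruned_numbers : List Int), Dom_pick_zonal_balanced_py score_dict exposure pruned_numbers → Spec_pick_zonal_balanced_py score_dict exposure pruned_numbers (pick_zonal_balanced_py score_dict exposure pruned_numbers)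

-- ===== LEMMAS AND PROOFS =====

-- if x goes before every element of l, insertBy just prepends it
theorem pv_insertBy_all_before {α : Type} (bef : α → α → Bool) (x : α) (l : List α)
    (h : ∀ z ∈ l, bef x z = true) : PySem.List.insertBy bef x l = x :: l := by
  cases l with
  | nil => simp [PySem.List.insertBy]
  | cons y ys => simp [PySem.List.insertBy, h y (by simp)]

-- filter commutes with a single descending insertion into an already-descending list
theorem pv_filter_insertBy (key : Int → Int) (p : Int → Bool) (x : Int) (l : List Int)
    (h : l.Pairwise (fun a b => key b ≤ key a)) :
    (PySem.List.insertBy (fun a b => decide (key b < key a)) x l).filter p =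
      if p x then PySem.List.insertBy (fun a b => decide (key b < key a)) x (l.filter p)
      else l.filter p := by
  induction l with
  | nil => cases hp : p x <;> simp [PySem.List.insertBy, hp]
  | cons y ys ih =>
    rcases List.pairwise_cons.mp h with ⟨hy, hys⟩
    by_cases hlt : key y < key x
    · -- x is inserted at the head
      have h1 : PySem.List.insertBy (fun a b => decide (key b < key a)) x (y :: ys)
          = x :: y :: ys := by simp [PySem.List.insertBy, hlt]
      rw [h1]
      cases hp : p x
      · simp [hp]
      · have h2 : PySem.List.insertBy (fun a b => decide (key b < key a)) x ((y :: ys).filter p)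
            = x :: (y :: ys).filter p := by
          apply pv_insertBy_all_before
          intro z hz
          have hz' : z ∈ y :: ys := List.mem_of_mem_filter hz
          have : key z ≤ key y := by
            rcases List.mem_cons.mp hz' with rfl | hz'' 
            · exact le_refl _
            · exact hy z hz''
          simp; omega
        simp [hp, h2]
    · -- x goes past y
      have h1 : PySem.List.insertBy (fun a b => decide (key b < key a)) x (y :: ys)
          = y :: PySem.List.insertBy (fun a b => decide (key b < key a)) x ys := by
        simp [PySem.List.insertBy, hlt]
      rw [h1]
      cases hp : p x <;> cases hpy : p y <;>
        simp [hp, hpy, ih hys, PySem.List.insertBy, hlt]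

-- a stable descending sort commutes with filter
theorem pv_filter_sorted_rev (key : Int → Int) (p : Int → Bool) (xs : List Int) :
    (PySem.List.sorted xs key true).filter p = PySem.List.sorted (xs.filter p) key true := by
  induction xs using List.reverseRecOn with
  | nil => simp [PySem.List.sorted_rev_eq_foldl_insertBy]
  | append_singleton xs x ih =>
    have hs : ∀ (l : List Int), PySem.List.sorted (l ++ [x]) key true
        = PySem.List.insertBy (fun a b => decide (key b < key a)) x (PySem.List.sorted l key true) := by
      intro l
      rw [PySem.List.sorted_rev_eq_foldl_insertBy, PySem.List.sorted_rev_eq_foldl_insertBy,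
        List.foldl_append]
      rfl
    rw [hs, pv_filter_insertBy key p x _ (PySem.List.sorted_pairwise_rev xs key), ih,
      List.filter_append]
    cases hp : p x
    · simp [hp]
    · simp only [hp, List.filter_cons, List.filter_nil, if_true]
      rw [hs]

-- the routing fold produces the capped per-zone filters
theorem pv_route_spec (l : List Int) (r1 r2 r3 : List Int)
    (h1 : r1.length ≤ 2) (h2 : r2.length ≤ 2) (h3 : r3.length ≤ 2) :
    l.foldl pvRouteStep (r1, r2, r3) =
      ((r1 ++ l.filter (fun n => decide (n ≤ 16))).take 2,
       (r2 ++ l.filter (fun n => !decide (n ≤ 16) && decide (n ≤ 32))).take 2,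
       (r3 ++ l.filter (fun n => !decide (n ≤ 16) && !decide (n ≤ 32))).take 2) := by
  induction l generalizing r1 r2 r3 with
  | nil => simp [List.take_of_length_le, h1, h2, h3]
  | cons n t ih =>
    simp only [List.foldl_cons]
    by_cases hn1 : n ≤ 16
    · by_cases hf : r1.length < 2
      · have := ih (r1 ++ [n]) r2 r3 (by simp; omega) h2 h3
        simp [pvRouteStep, hn1, hf, this]
      · have hlen : r1.length = 2 := by omega
        have := ih r1 r2 r3 h1 h2 h3
        simp [pvRouteStep, hn1, hf, this]
        rw [List.take_append_of_le_length (by omega),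
          List.take_append_of_le_length (by omega)]
    · by_cases hn2 : n ≤ 32
      · by_cases hf : r2.length < 2
        · have := ih r1 (r2 ++ [n]) r3 h1 (by simp; omega) h3
          simp [pvRouteStep, hn1, hn2, hf, this]
        · have := ih r1 r2 r3 h1 h2 h3
          simp [pvRouteStep, hn1, hn2, hf, this]
          rw [List.take_append_of_le_length (by omega),
            List.take_append_of_le_length (by omega)]
      · by_cases hf : r3.length < 2
        · have := ih r1 r2 (r3 ++ [n]) h1 h2 (by simp; omega)
          simp [pvRouteStep, hn1, hn2, hf, this]
        · have := ih r1 r2 r3 h1 h2 h3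
          simp [pvRouteStep, hn1, hn2, hf, this]
          rw [List.take_append_of_le_length (by omega),
            List.take_append_of_le_length (by omega)]

-- the three zone filters of range(1,50)
theorem pv_zone1 : (PySem.List.pyRange 1 50 1).filter (fun n => decide (n ≤ 16)) = PySem.List.pyRange 1 17 1 := by decide
theorem pv_zone2 : (PySem.List.pyRange 1 50 1).filter (fun n => !decide (n ≤ 16) && decide (n ≤ 32)) = PySem.List.pyRange 17 33 1 := by decide
theorem pv_zone3 : (PySem.List.pyRange 1 50 1).filter (fun n => !decide (n ≤ 16) && !decide (n ≤ 32)) = PySem.List.pyRange 33 50 1 := by decide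

-- ===== VERDICT (by name: the statement is the Claim_ definition above) =====
theorem pick_zonal_balanced_py_spec : Claim_equal_pick_zonal_balanced_py := by
  intro score_dict exposure pruned_numbers _
  unfold Spec_pick_zonal_balanced_py pick_zonal_balanced_py pick_zonal_balanced_py_alt
  simp only [List.foldl_cons, List.foldl_nil, List.nil_append]
  rw [pv_route_spec _ [] [] [] (by simp) (by simp) (by simp)]
  simp only [List.nil_append]
  rw [pv_filter_sorted_rev, pv_filter_sorted_rev, pv_filter_sorted_rev,
    List.filter_comm (fun n => decide (n ≤ 16)) (fun n => !pruned_numbers.contains n),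
    List.filter_comm (fun n => !decide (n ≤ 16) && decide (n ≤ 32)) (fun n => !pruned_numbers.contains n),
    List.filter_comm (fun n => !decide (n ≤ 16) && !decide (n ≤ 32)) (fun n => !pruned_numbers.contains n),
    pv_zone1, pv_zone2, pv_zone3,
    PySem.List.slice_to _ (by norm_num), PySem.List.slice_to _ (by norm_num),
    PySem.List.slice_to _ (by norm_num)]
  simp [List.append_assoc]
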